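-- pv_equiv track=rewrite | github.com/kejrak/advent-of-code-2023 | 14-Parabolic-Reflector-Dish/python/main.py | move_stones
-- ===== SOURCE A (Python) =====
-- def move_stones(row: list[str]):
--     counter = 0
--     load = 0
--     for i, symbol in enumerate(row):
--         if symbol == ".":
--             counter += 1
--         elif symbol == "O":
--             load += counter + len(row) - i
--         else:
--             counter = 0
--     return load
-- ===== SOURCE B (Python) =====
-- def move_stones(row: list[str]):
--     n = len(row)
--     total = 0
--     i = 0
--     while i < n:
--         if row[i] == "." or row[i] == "O":
--             s = i
--             c = 0
--             while i < n and (row[i] == "." or row[i] == "O"):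
--                 if row[i] == "O":
--                     c += 1
--                 i += 1
--             total += c * (n - s) - c * (c - 1) // 2
--         else:
--             i += 1
--     return total
-- ===== Notes on version B (the rewrite author's own statement) =====
-- stated objective: alternative
-- what changed: Instead of A's per-cell counter/load state machine, B walks maximal wall-free segments, counts the rocks c in each segment starting at s, and adds their total load in closed form c*(n-s) - c*(c-1)//2, one term per segment.
import Mathlib
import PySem

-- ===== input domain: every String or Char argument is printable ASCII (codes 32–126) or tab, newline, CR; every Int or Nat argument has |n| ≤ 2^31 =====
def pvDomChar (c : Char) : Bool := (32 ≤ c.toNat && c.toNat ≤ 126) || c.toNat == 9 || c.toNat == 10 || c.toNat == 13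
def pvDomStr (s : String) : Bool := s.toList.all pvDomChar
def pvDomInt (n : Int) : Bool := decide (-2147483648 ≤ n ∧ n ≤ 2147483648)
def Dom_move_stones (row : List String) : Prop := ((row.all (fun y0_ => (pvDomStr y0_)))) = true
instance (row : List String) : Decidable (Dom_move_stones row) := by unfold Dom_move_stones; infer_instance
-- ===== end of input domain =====

-- B replaces A's per-cell counter/load state machine with a walk over maximal wall-free
-- segments, adding each segment's total load in closed form (objective: alternative).

-- ===== PORT A =====
-- A's for-loop over enumerate(row): structural recursion over the list carrying the
-- index i and the same state (counter, load).
def pvAGo (n : Int) : List String → Int → Int → Int → Int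
  | [], _, _, load => load
  | x :: xs, i, counter, load =>
    if x = "." then pvAGo n xs (i + 1) (counter + 1) load
    else if x = "O" then pvAGo n xs (i + 1) counter (load + counter + n - i)
    else pvAGo n xs (i + 1) 0 load

def move_stones (row : List String) : Int :=
  pvAGo (row.length : Int) row 0 0 0

-- ===== PORT B =====
-- B's outer while-loop (between segments, at index i) and inner while-loop (inside a
-- segment that started at s, having seen c rocks), as mutual structural recursion.
mutual
def pvBOut (n : Int) : List String → Int → Int
  | [], _ => 0
  | x :: xs, i =>
    if x = "." ∨ x = "O" then
      pvBSeg n xs (i + 1) i (if x = "O" then 1 else 0)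
    else pvBOut n xs (i + 1)

def pvBSeg (n : Int) : List String → Int → Int → Nat → Int
  | [], _, s, c => (c : Int) * (n - s) - PySem.Int.floordiv ((c : Int) * ((c : Int) - 1)) 2
  | x :: xs, i, s, c =>
    if x = "." ∨ x = "O" then
      pvBSeg n xs (i + 1) s (if x = "O" then c + 1 else c)
    else
      ((c : Int) * (n - s) - PySem.Int.floordiv ((c : Int) * ((c : Int) - 1)) 2)
        + pvBOut n xs (i + 1)
end

def move_stones_alt (row : List String) : Int :=
  pvBOut (row.length : Int) row 0

-- ===== PRECONDITION & SPEC =====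
def Spec_move_stones (row : List String) (out : Int) : Prop := out = move_stones_alt row
instance (row : List String) (out : Int) : Decidable (Spec_move_stones row out) := by unfold Spec_move_stones; infer_instance

-- ===== CLAIM (what is proved, stated in full; the proofs are below) =====
def Claim_equal_move_stones : Prop := ∀ (row : List String), Dom_move_stones row → Spec_move_stones row (move_stones row)

-- ===== LEMMAS AND PROOFS =====

-- the closed-form load of a finished segment (B's per-segment term)
def pvCF (n s : Int) (c : Nat) : Int :=
  (c : Int) * (n - s) - PySem.Int.floordiv ((c : Int) * ((c : Int) - 1)) 2

theorem pvCF_zero (n s : Int) : pvCF n s 0 = 0 := by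
  simp [pvCF, PySem.Int.floordiv]

theorem pvCF_succ (n s : Int) (c : Nat) :
    pvCF n s (c + 1) = pvCF n s c + (n - s - c) := by
  obtain ⟨k, hk⟩ : Even ((c : Int) * ((c : Int) - 1)) := Int.even_mul_pred_self _
  have key : PySem.Int.floordiv ((c : Int) * ((c : Int) - 1)) 2 = k := by
    rw [hk, PySem.Int.floordiv_eq_ediv_of_pos (by norm_num)]; omega
  have h3 : (((c + 1 : Nat)) : Int) * ((((c + 1 : Nat)) : Int) - 1) = (k + c) + (k + c) := by
    push_cast
    have h4 : ((c : Int) + 1) * (((c : Int) + 1) - 1) = (c : Int) * ((c : Int) - 1) + 2 * c := by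
      ring
    rw [h4, hk]; ring
  have key2 : PySem.Int.floordiv ((((c + 1 : Nat)) : Int) * ((((c + 1 : Nat)) : Int) - 1)) 2
      = k + c := by
    rw [h3, PySem.Int.floordiv_eq_ediv_of_pos (by norm_num)]; omega
  unfold pvCF
  rw [key, key2]
  push_cast; ring

-- joint loop invariant: from any point, A's loop and B's two loops agree.
-- In segment state the correspondence is counter = i - s - c.
theorem pv_main (xs : List String) (n : Int) :
    (∀ (s : Int) (c : Nat) (i acc : Int),
        pvAGo n xs i (i - s - c) acc = acc - pvCF n s c + pvBSeg n xs i s c) ∧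
    (∀ (i acc : Int), pvAGo n xs i 0 acc = acc + pvBOut n xs i) := by
  induction xs with
  | nil =>
    constructor
    · intro s c i acc; simp [pvAGo, pvBSeg, pvCF]
    · intro i acc; simp [pvAGo, pvBOut]
  | cons x xs ih =>
    obtain ⟨ihS, ihO⟩ := ih
    constructor
    · intro s c i acc
      by_cases hd : x = "."
      · have : i - s - (c : Int) + 1 = (i + 1) - s - (c : Int) := by ring
        simp only [pvAGo, pvBSeg, hd, this]
        have := ihS s c (i + 1) acc
        simpa using this
      · by_cases ho : x = "O"
        · subst ho
          have hstepA : pvAGo n ("O" :: xs) i (i - s - (c : Int)) acc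
              = pvAGo n xs (i + 1) (i - s - (c : Int)) (acc + (i - s - (c : Int)) + n - i) := by
            simp [pvAGo]
          have hstepB : pvBSeg n ("O" :: xs) i s c = pvBSeg n xs (i + 1) s (c + 1) := by
            simp [pvBSeg]
          have hcnt : i - s - (c : Int) = (i + 1) - s - ((c + 1 : Nat) : Int) := by
            push_cast; ring
          rw [hstepA, hstepB, hcnt, ihS s (c + 1) (i + 1) _, pvCF_succ]
          push_cast; ring
        · have hw : ¬ (x = "." ∨ x = "O") := by simp [hd, ho]
          simp only [pvAGo, pvBSeg, if_neg hd, if_neg ho, if_neg hw]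
          rw [ihO (i + 1) acc]
          show acc + pvBOut n xs (i + 1) = acc - pvCF n s c + (pvCF n s c + pvBOut n xs (i + 1))
          ring
    · intro i acc
      by_cases hd : x = "."
      · simp only [pvAGo, pvBOut, hd]
        have h : (0 : Int) + 1 = (i + 1) - i - ((0 : Nat) : Int) := by simp
        rw [h, ihS i 0 (i + 1) acc, pvCF_zero]
        simp
      · by_cases ho : x = "O"
        · subst ho
          have hstepA : pvAGo n ("O" :: xs) i 0 acc = pvAGo n xs (i + 1) 0 (acc + 0 + n - i) := by
            simp [pvAGo]
          have hstepB : pvBOut n ("O" :: xs) i = pvBSeg n xs (i + 1) i 1 := by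
            simp [pvBOut]
          have key := ihS i 1 (i + 1) (acc + 0 + n - i)
          have e : (i + 1) - i - ((1 : Nat) : Int) = 0 := by simp
          rw [e] at key
          have hcf : pvCF n i 1 = n - i := by
            have h0 := pvCF_succ n i 0
            rw [pvCF_zero] at h0
            simpa using h0
          rw [hstepA, hstepB, key, hcf]
          ring
        · have hw : ¬ (x = "." ∨ x = "O") := by simp [hd, ho]
          simp only [pvAGo, pvBOut, if_neg hd, if_neg ho, if_neg hw]
          exact ihO (i + 1) acc

-- ===== VERDICT (by name: the statement is the Claim_ definition above) =====
theorem move_stones_spec : Claim_equal_move_stones := by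
  intro row _
  show move_stones row = move_stones_alt row
  have := (pv_main row (row.length : Int)).2 0 0
  simpa [move_stones, move_stones_alt] using this
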